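-- pv_equiv track=rewrite | github.com/weilu/coop-learning | src/friends.py | precalculate_coalitions
-- ===== SOURCE A (Python) =====
-- def precalculate_coalitions(votes):
--     coalition_matrix = []
--     for row_index, row in enumerate(votes):
--         coalitions = [None]*len(row)
--         for_coalition = set()
--         against_coalition = set()
--         for col_index, vote in enumerate(row):
--             if vote == 1:
--                 for_coalition.add(col_index)
--                 coalitions[col_index] = for_coalition
--             elif vote == 2:
--                 against_coalition.add(col_index)
--                 coalitions[col_index] = against_coalition
--         coalition_matrix.append(coalitions)
--     return coalition_matrix
-- ===== SOURCE B (Python) =====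
-- def precalculate_coalitions(votes):
--     result = []
--     for row in votes:
--         pairs = sorted((v, j) for j, v in enumerate(row))
--         groups = {}
--         prev = None
--         for v, j in pairs:
--             if v != prev:
--                 members = set()
--                 groups[v] = members
--                 prev = v
--             members.add(j)
--         result.append([groups[v] if v in (1, 2) else None for v in row])
--     return result
-- ===== Notes on version B (the rewrite author's own statement) =====
-- stated objective: alternative
-- what changed: Replaces A's single-pass loop (two dedicated mutable for/against accumulators with cells assigned during the scan) by a sort-then-group algorithm: each row's (vote, index) pairs are sorted, one coalition set per run of equal adjacent votes is built into a value-keyed table, and the cells are then resolved by table lookup.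
import Mathlib
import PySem

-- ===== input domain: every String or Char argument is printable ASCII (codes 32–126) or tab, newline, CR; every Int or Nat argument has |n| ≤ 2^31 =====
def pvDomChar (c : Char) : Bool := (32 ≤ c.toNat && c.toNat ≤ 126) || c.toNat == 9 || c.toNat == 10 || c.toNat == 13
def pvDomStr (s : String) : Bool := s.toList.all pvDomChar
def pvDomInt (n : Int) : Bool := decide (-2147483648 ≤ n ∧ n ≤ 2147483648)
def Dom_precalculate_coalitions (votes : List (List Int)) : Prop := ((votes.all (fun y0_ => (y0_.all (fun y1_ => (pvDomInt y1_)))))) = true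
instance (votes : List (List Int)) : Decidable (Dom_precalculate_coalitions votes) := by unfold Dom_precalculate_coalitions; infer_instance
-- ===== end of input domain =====

-- B replaces A's single-pass loop (two dedicated mutable accumulators, cells assigned
-- during the scan) with a sort-then-group algorithm: sort each row's (vote, index)
-- pairs, build one coalition set per run of equal votes, then resolve cells by lookup.
-- Objective: alternative (same result, genuinely different algorithm; not faster).

-- ===== PORT A =====
-- Python's cells alias the two mutable set objects, so each stored reference denotes the
-- FINAL set of its row.  The port renders a stored reference as a tag (some true = the
-- for-set, some false = the against-set) recorded at the cell's position during the loop
-- (col_index runs 0,1,2,… so writing coalitions[col_index] fills positions in order),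
-- and dereferences the tags to the final sets once the row's loop is done — exactly the
-- value Python's aliasing yields.
def precalculate_coalitions (votes : List (List Int)) : List (List (Option (List Int))) :=
  votes.foldl (fun coalition_matrix row =>
    let st := (PySem.List.enumerate row).foldl
      (fun (st : PySem.Set Int × PySem.Set Int × List (Option Bool)) p =>
        if p.2 == 1 then (PySem.Set.add st.1 p.1, st.2.1, st.2.2 ++ [some true])
        else if p.2 == 2 then (st.1, PySem.Set.add st.2.1 p.1, st.2.2 ++ [some false])
        else (st.1, st.2.1, st.2.2 ++ [none]))
      (PySem.Set.empty, PySem.Set.empty, [])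
    coalition_matrix ++ [st.2.2.map (fun t => match t with
      | some true => some st.1
      | some false => some st.2.1
      | none => none)]) []

-- ===== PORT B =====
-- One step of Source B's grouping scan over the sorted (vote, index) pairs.  Python's
-- 'members' variable aliases the set stored at groups[v]: starting a run stores the
-- fresh set {j} at groups[v] (members = set(); groups[v] = members; prev = v;
-- members.add(j) fused into one value-level step), and inside a run members.add(j)
-- mutates the set stored at groups[v] = groups[prev], i.e. Dict.modify at key v.
def pvGroupStep (st : PySem.Dict Int (PySem.Set Int) × Option Int) (q : Int × Int) :
    PySem.Dict Int (PySem.Set Int) × Option Int :=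
  if some q.1 ≠ st.2 then
    (st.1.insert q.1 (PySem.Set.add PySem.Set.empty q.2), some q.1)
  else
    (st.1.modify q.1 PySem.Set.empty (fun s => PySem.Set.add s q.2), st.2)

def precalculate_coalitions_alt (votes : List (List Int)) : List (List (Option (List Int))) :=
  votes.foldl (fun result row =>
    -- pairs = sorted((v, j) for j, v in enumerate(row))  (tuple order = sorted2 on fst, snd)
    let pairs := PySem.List.sorted2 ((PySem.List.enumerate row).map (fun p => (p.2, p.1)))
      (fun q => q.1) (fun q => q.2)
    let st := pairs.foldl pvGroupStep (PySem.Dict.empty, none)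
    -- groups[v] if v in (1, 2) else None: every v ∈ row is a key of groups, so Python's
    -- raising lookup groups[v] returns the stored set = (get? v).get — rendered as get? v,
    -- which is 'some set' exactly on the reachable (key-present) cases.
    result ++ [row.map (fun v => if v == 1 || v == 2 then st.1.get? v else none)]) []

-- ===== PRECONDITION & SPEC =====
def Spec_precalculate_coalitions (votes : List (List Int)) (out : List (List (Option (List Int)))) : Prop := out = precalculate_coalitions_alt votes
instance (votes : List (List Int)) (out : List (List (Option (List Int)))) : Decidable (Spec_precalculate_coalitions votes out) := by unfold Spec_precalculate_coalitions; infer_instance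

-- ===== CLAIM (what is proved, stated in full; the proofs are below) =====
def Claim_equal_precalculate_coalitions : Prop := ∀ (votes : List (List Int)), Dom_precalculate_coalitions votes → Spec_precalculate_coalitions votes (precalculate_coalitions votes)

-- ===== LEMMAS AND PROOFS =====

-- ascending list of the column indices of row that hold vote value v
def pvIdx (row : List Int) (v : Int) : List Int :=
  (PySem.List.enumerate row).filterMap (fun p => if p.2 == v then some p.1 else none)

-- Invariant of A's inner loop: starting at index s with accumulated sets whose elements
-- are all < s, the loop appends exactly the matching indices (each add really appends,
-- since the index is new) and records one tag per vote.
theorem pvRowLoop (row : List Int) (s : Int)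
    (f0 a0 : PySem.Set Int) (t0 : List (Option Bool))
    (hf : ∀ x ∈ f0, x < s) (ha : ∀ x ∈ a0, x < s) :
    (PySem.List.enumerate row s).foldl
      (fun (st : PySem.Set Int × PySem.Set Int × List (Option Bool)) p =>
        if p.2 == 1 then (PySem.Set.add st.1 p.1, st.2.1, st.2.2 ++ [some true])
        else if p.2 == 2 then (st.1, PySem.Set.add st.2.1 p.1, st.2.2 ++ [some false])
        else (st.1, st.2.1, st.2.2 ++ [none]))
      (f0, a0, t0)
    = (f0 ++ (PySem.List.enumerate row s).filterMap (fun p => if p.2 == 1 then some p.1 else none),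
       a0 ++ (PySem.List.enumerate row s).filterMap (fun p => if p.2 == 2 then some p.1 else none),
       t0 ++ row.map (fun v => if v == 1 then some true else if v == 2 then some false else none)) := by
  induction row generalizing s f0 a0 t0 with
  | nil => simp [PySem.List.enumerate_nil]
  | cons v rest ih =>
    rw [PySem.List.enumerate_cons]
    by_cases h1 : v = 1
    · subst h1
      simp only [List.foldl_cons, List.filterMap_cons, List.map_cons,
        show ((1:Int) == 1) = true by decide, show ((1:Int) == 2) = false by decide,
        if_true, Bool.false_eq_true, if_false]
      have hs : s ∉ f0 := fun hm => absurd (hf s hm) (lt_irrefl s)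
      have hadd : PySem.Set.add f0 s = f0 ++ [s] := by
        simp [PySem.Set.add, PySem.Set.contains, hs]
      rw [hadd, ih (s+1) (f0 ++ [s]) a0 (t0 ++ [some true])
            (by intro x hx; rcases List.mem_append.1 hx with h | h
                · exact lt_trans (hf x h) (by omega)
                · simp at h; omega)
            (fun x hx => lt_trans (ha x hx) (by omega))]
      simp
    · by_cases h2 : v = 2
      · subst h2
        simp only [List.foldl_cons, List.filterMap_cons, List.map_cons,
          show ((2:Int) == 1) = false by decide, show ((2:Int) == 2) = true by decide,
          if_true, Bool.false_eq_true, if_false]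
        have hs : s ∉ a0 := fun hm => absurd (ha s hm) (lt_irrefl s)
        have hadd : PySem.Set.add a0 s = a0 ++ [s] := by
          simp [PySem.Set.add, PySem.Set.contains, hs]
        rw [hadd, ih (s+1) f0 (a0 ++ [s]) (t0 ++ [some false])
              (fun x hx => lt_trans (hf x hx) (by omega))
              (by intro x hx; rcases List.mem_append.1 hx with h | h
                  · exact lt_trans (ha x h) (by omega)
                  · simp at h; omega)]
        simp
      · have e1 : (v == 1) = false := by simp [h1]
        have e2 : (v == 2) = false := by simp [h2]
        simp only [List.foldl_cons, List.filterMap_cons, List.map_cons, e1, e2,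
          Bool.false_eq_true, if_false]
        rw [ih (s+1) f0 a0 (t0 ++ [none])
              (fun x hx => lt_trans (hf x hx) (by omega))
              (fun x hx => lt_trans (ha x hx) (by omega))]
        simp

-- B's sorted2 on pairs is insertion sort by the lexicographic key
theorem pvSorted2Lex (xs : List (Int × Int)) :
    PySem.List.sorted2 xs (fun q => q.1) (fun q => q.2)
      = PySem.List.sorted xs (fun q => toLex q) := by
  have hcmp : (fun (a b : Int × Int) =>
        (decide (a.1 < b.1) || (!decide (b.1 < a.1) && decide (a.2 < b.2))))
      = (fun (a b : Int × Int) => decide ((toLex a : Lex (Int × Int)) < toLex b)) := by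
    funext a b
    by_cases h1 : a.1 < b.1 <;> by_cases h2 : b.1 < a.1 <;> by_cases h3 : a.2 < b.2 <;>
      simp [Prod.Lex.lt_iff, h1, h2, h3] <;> omega
  unfold PySem.List.sorted2 PySem.List.sorted
  simp only [if_neg (by decide : ¬ (false = true)), hcmp]

-- the v-block of the swapped pairs is pvIdx tagged with v
theorem pvBlockFilter (v : Int) (l : List (Int × Int)) :
    (l.map (fun p => (p.2, p.1))).filter (fun q => q.1 == v)
      = (l.filterMap (fun p => if p.2 == v then some p.1 else none)).map (fun j => (v, j)) := by
  induction l with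
  | nil => simp
  | cons p t ih => by_cases h : p.2 = v <;> simp [h, ih]

-- grouping a list by its distinct key values is a permutation of it
theorem pvPermFlatMapFilter (vals : List Int) (l : List (Int × Int))
    (hnd : vals.Nodup) (hcov : ∀ q ∈ l, q.1 ∈ vals) :
    (vals.flatMap (fun v => l.filter (fun q => q.1 == v))).Perm l := by
  induction vals generalizing l with
  | nil =>
    have hl : l = [] := List.eq_nil_iff_forall_not_mem.2 (fun q hq => by simpa using hcov q hq)
    simp [hl]
  | cons v vs ih =>
    rcases List.nodup_cons.1 hnd with ⟨hv, hvs⟩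
    simp only [List.flatMap_cons]
    have hcongr : vs.flatMap (fun u => l.filter (fun q => q.1 == u))
        = vs.flatMap (fun u => (l.filter (fun q => !(q.1 == v))).filter (fun q => q.1 == u)) := by
      apply List.flatMap_congr
      intro u hu
      rw [List.filter_filter]
      apply List.filter_congr
      intro q hq
      by_cases hqu : q.1 = u
      · have huv : u ≠ v := fun h => hv (h ▸ hu)
        simp [hqu, huv]
      · simp [hqu]
    rw [hcongr]
    have hcov' : ∀ q ∈ l.filter (fun q => !(q.1 == v)), q.1 ∈ vs := by
      intro q hq
      rcases List.mem_filter.1 hq with ⟨hql, hqv⟩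
      have := hcov q hql
      simp only [List.mem_cons] at this
      rcases this with h | h
      · exact absurd h (by simpa using hqv)
      · exact h
    exact (List.Perm.append_left _ (ih _ hvs hcov')).trans
      (List.filter_append_perm (fun q => q.1 == v) l)

-- blocks with increasing tags and increasing members are lexicographically increasing
theorem pvCanonPairwise (vals : List Int) (blocks : Int → List Int)
    (hv : vals.Pairwise (· < ·)) (hb : ∀ v ∈ vals, (blocks v).Pairwise (· < ·)) :
    (vals.flatMap (fun v => (blocks v).map (fun j => (v, j)))).Pairwise
      (fun a b => (toLex a : Lex (Int × Int)) < toLex b) := by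
  induction vals with
  | nil => simp
  | cons v vs ih =>
    rcases List.pairwise_cons.1 hv with ⟨hvh, hvt⟩
    simp only [List.flatMap_cons]
    refine List.pairwise_append.2 ⟨?_, ih hvt (fun u hu => hb u (List.mem_cons_of_mem _ hu)), ?_⟩
    · rw [List.pairwise_map]
      exact (hb v List.mem_cons_self).imp (fun h => by
        rw [Prod.Lex.lt_iff]; right; exact ⟨rfl, h⟩)
    · intro a ha b hb2
      rcases List.mem_map.1 ha with ⟨j, _, rfl⟩
      rcases List.mem_flatMap.1 hb2 with ⟨u, hu, hbu⟩
      rcases List.mem_map.1 hbu with ⟨j2, _, rfl⟩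
      rw [Prod.Lex.lt_iff]
      left
      exact hvh u hu

-- pvIdx lists ascending indices
theorem pvFilterMapPairwise (l : List (Int × Int)) (v : Int)
    (h : l.Pairwise (fun p q => p.1 < q.1)) :
    (l.filterMap (fun p => if p.2 == v then some p.1 else none)).Pairwise (· < ·) := by
  induction l with
  | nil => simp
  | cons p t ih =>
    rcases List.pairwise_cons.1 h with ⟨hph, hpt⟩
    by_cases hc : p.2 = v
    · rw [List.filterMap_cons_some (b := p.1) (by simp [hc])]
      refine List.pairwise_cons.2 ⟨?_, ih hpt⟩
      intro j hj
      rcases List.mem_filterMap.1 hj with ⟨q, hq, hfq⟩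
      have hq1 : q.1 = j := by by_cases h2 : q.2 = v <;> simp [h2] at hfq <;> omega
      rw [← hq1]
      exact hph q hq
    · rw [List.filterMap_cons_none (by simp [hc])]
      exact ih hpt

theorem pvIdxPairwise (row : List Int) (v : Int) : (pvIdx row v).Pairwise (· < ·) :=
  pvFilterMapPairwise _ v (PySem.List.pairwise_lt_enumerate row 0)

theorem pvIdxNe (row : List Int) (v : Int) (h : v ∈ row) : pvIdx row v ≠ [] := by
  have hm : v ∈ (PySem.List.enumerate row 0).map (fun p => p.2) := by
    rw [PySem.List.map_snd_enumerate]; exact h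
  rcases List.mem_map.1 hm with ⟨p, hp, hv⟩
  intro hnil
  have : p.1 ∈ pvIdx row v := by
    unfold pvIdx
    exact List.mem_filterMap.2 ⟨p, hp, by simp [hv]⟩
  rw [hnil] at this; simp at this

-- B's sorted pairs are exactly the canonical blocks: one ascending run per distinct value
theorem pvSortedCanon (row : List Int) :
    PySem.List.sorted2 ((PySem.List.enumerate row).map (fun p => (p.2, p.1)))
      (fun q => q.1) (fun q => q.2)
    = (PySem.List.sorted (PySem.Set.ofList row) (fun x => x)).flatMap
        (fun v => (pvIdx row v).map (fun j => (v, j))) := by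
  rw [pvSorted2Lex]
  apply PySem.List.sorted_eq_of_perm_of_pairwise_lt
  · have hrw : (PySem.List.sorted (PySem.Set.ofList row) (fun x => x)).flatMap
        (fun v => (pvIdx row v).map (fun j => (v, j)))
        = (PySem.List.sorted (PySem.Set.ofList row) (fun x => x)).flatMap
            (fun v => ((PySem.List.enumerate row).map (fun p => (p.2, p.1))).filter
              (fun q => q.1 == v)) := by
      apply List.flatMap_congr
      intro v _
      exact (pvBlockFilter v (PySem.List.enumerate row)).symm
    rw [hrw]
    apply pvPermFlatMapFilter
    · exact (PySem.List.sorted_ofList_pairwise_lt row).imp (fun h => ne_of_lt h)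
    · intro q hq
      rcases List.mem_map.1 hq with ⟨pp, hpp, rfl⟩
      rw [PySem.List.mem_sorted, PySem.Set.mem_ofList]
      have := PySem.List.map_snd_enumerate row 0
      rw [← this]
      exact List.mem_map.2 ⟨pp, hpp, rfl⟩
  · exact pvCanonPairwise _ _ (PySem.List.sorted_ofList_pairwise_lt row)
      (fun v _ => pvIdxPairwise row v)

-- inside a run the step only extends the set stored at key v
theorem pvBlockTail (v : Int) (rest : List Int) (g : PySem.Dict Int (PySem.Set Int)) :
    (rest.map (fun j => (v, j))).foldl pvGroupStep (g, some v)
      = (rest.foldl (fun g j => g.modify v PySem.Set.empty (fun s => PySem.Set.add s j)) g,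
         some v) := by
  induction rest generalizing g with
  | nil => simp
  | cons j t ih => simp [pvGroupStep, ih]

-- the modify-fold appends the fresh ascending members to the set at key v
theorem pvModFold (v : Int) (rest : List Int) (g : PySem.Dict Int (PySem.Set Int))
    (cur : List Int) (hg : g.get? v = some cur)
    (hlt : ∀ j ∈ rest, ∀ x ∈ cur, x < j) (hp : rest.Pairwise (· < ·)) :
    (rest.foldl (fun g j => g.modify v PySem.Set.empty (fun s => PySem.Set.add s j)) g).get? v
        = some (cur ++ rest)
    ∧ ∀ k, k ≠ v →
      (rest.foldl (fun g j => g.modify v PySem.Set.empty (fun s => PySem.Set.add s j)) g).get? k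
        = g.get? k := by
  induction rest generalizing g cur with
  | nil => exact ⟨by simpa using hg, fun k _ => rfl⟩
  | cons j t ih =>
    rcases List.pairwise_cons.1 hp with ⟨hjt, htp⟩
    have hjcur : j ∉ cur := fun hm => lt_irrefl j (hlt j List.mem_cons_self j hm)
    have hgetD : g.getD v PySem.Set.empty = cur := by
      rw [PySem.Dict.getD_eq_get?_getD, hg]; rfl
    have hadd : PySem.Set.add cur j = cur ++ [j] := by
      simp [PySem.Set.add, PySem.Set.contains, hjcur]
    have hstep : g.modify v PySem.Set.empty (fun s => PySem.Set.add s j)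
        = g.insert v (cur ++ [j]) := by
      simp only [PySem.Dict.modify]
      rw [hgetD, hadd]
    simp only [List.foldl_cons, hstep]
    have hlt' : ∀ j' ∈ t, ∀ x ∈ cur ++ [j], x < j' := by
      intro j' hj' x hx
      rcases List.mem_append.1 hx with h | h
      · exact hlt j' (List.mem_cons_of_mem _ hj') x h
      · simp at h; subst h; exact hjt j' hj'
    obtain ⟨h1, h2⟩ := ih (g.insert v (cur ++ [j])) (cur ++ [j])
      (PySem.Dict.get?_insert_self g v (cur ++ [j])) hlt' htp
    refine ⟨by rw [h1]; simp, ?_⟩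
    intro k hk
    rw [h2 k hk, PySem.Dict.get?_insert_of_ne g _ hk]

-- one whole run: it installs its member list at its key and touches nothing else
theorem pvBlockFold (v : Int) (js : List Int) (g : PySem.Dict Int (PySem.Set Int))
    (p : Option Int) (hne : p ≠ some v) (hjs : js.Pairwise (· < ·)) (hnil : js ≠ []) :
    ∃ d, (js.map (fun j => (v, j))).foldl pvGroupStep (g, p) = (d, some v)
      ∧ d.get? v = some js ∧ ∀ k, k ≠ v → d.get? k = g.get? k := by
  rcases js with _ | ⟨j, rest⟩
  · exact absurd rfl hnil
  rcases List.pairwise_cons.1 hjs with ⟨hjr, hrp⟩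
  have hcond : some ((v, j).1) ≠ (g, p).2 := fun h => hne h.symm
  have hstep : pvGroupStep (g, p) (v, j)
      = (g.insert v (PySem.Set.add PySem.Set.empty j), some v) := by
    unfold pvGroupStep
    rw [if_pos hcond]
  have hempty : PySem.Set.add PySem.Set.empty j = [j] := by
    simp [PySem.Set.add, PySem.Set.contains, PySem.Set.empty]
  simp only [List.map_cons, List.foldl_cons, hstep, hempty, pvBlockTail]
  obtain ⟨h1, h2⟩ := pvModFold v rest (g.insert v [j]) [j]
    (PySem.Dict.get?_insert_self g v [j])
    (by intro j' hj' x hx; simp at hx; subst hx; exact hjr j' hj') hrp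
  refine ⟨_, rfl, by simpa using h1, ?_⟩
  intro k hk
  rw [h2 k hk, PySem.Dict.get?_insert_of_ne g _ hk]

-- the grouping scan over the canonical blocks maps every value to its block
theorem pvGroupFold (vals : List Int) (blocks : Int → List Int)
    (g : PySem.Dict Int (PySem.Set Int)) (p : Option Int)
    (hv : vals.Pairwise (· < ·)) (hp : ∀ u ∈ vals, p ≠ some u)
    (hb : ∀ u ∈ vals, (blocks u).Pairwise (· < ·) ∧ blocks u ≠ []) :
    ∀ k, ((vals.flatMap (fun v => (blocks v).map (fun j => (v, j)))).foldl pvGroupStep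
            (g, p)).1.get? k
      = if k ∈ vals then some (blocks k) else g.get? k := by
  induction vals generalizing g p with
  | nil => intro k; simp
  | cons v vs ih =>
    rcases List.pairwise_cons.1 hv with ⟨hvh, hvt⟩
    obtain ⟨hbp, hbn⟩ := hb v List.mem_cons_self
    obtain ⟨d, hfold, hdv, hdk⟩ := pvBlockFold v (blocks v) g p (hp v List.mem_cons_self) hbp hbn
    intro k
    simp only [List.flatMap_cons, List.foldl_append]
    rw [hfold]
    rw [ih d (some v) hvt
        (fun u hu h => absurd (Option.some.inj h) (ne_of_lt (hvh u hu)))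
        (fun u hu => hb u (List.mem_cons_of_mem _ hu)) k]
    by_cases hk : k ∈ vs
    · simp [hk, List.mem_cons]
    · by_cases hkv : k = v
      · subst hkv
        have hnv : k ∉ vs := fun h => lt_irrefl k (hvh k h)
        simp [hnv, hdv]
      · rw [if_neg hk, if_neg (by simp [List.mem_cons]; tauto)]
        exact hdk k hkv

-- ===== VERDICT (by name: the statement is the Claim_ definition above) =====
theorem precalculate_coalitions_spec : Claim_equal_precalculate_coalitions := by
  intro votes _
  show precalculate_coalitions votes = precalculate_coalitions_alt votes
  unfold precalculate_coalitions precalculate_coalitions_alt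
  rw [PySem.List.foldl_append_singleton_eq_map, PySem.List.foldl_append_singleton_eq_map]
  simp only [List.nil_append]
  apply List.map_congr_left
  intro row _
  rw [pvRowLoop row 0 PySem.Set.empty PySem.Set.empty []
        (by simp [PySem.Set.empty]) (by simp [PySem.Set.empty])]
  simp only [List.nil_append, PySem.Set.empty]
  rw [List.map_map, pvSortedCanon]
  have hmem : ∀ u : Int, u ∈ PySem.List.sorted (PySem.Set.ofList row) (fun x => x) ↔ u ∈ row := by
    intro u
    rw [PySem.List.mem_sorted, PySem.Set.mem_ofList]
  have hgf := pvGroupFold (PySem.List.sorted (PySem.Set.ofList row) (fun x => x)) (pvIdx row)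
      PySem.Dict.empty none
      (PySem.List.sorted_ofList_pairwise_lt row)
      (fun u _ => by simp)
      (fun u hu => ⟨pvIdxPairwise row u, pvIdxNe row u ((hmem u).1 hu)⟩)
  apply List.map_congr_left
  intro v hv
  by_cases h1 : v = 1
  · subst h1
    rw [hgf 1, if_pos ((hmem 1).2 hv)]
    simp [pvIdx]
  · by_cases h2 : v = 2
    · subst h2
      rw [hgf 2, if_pos ((hmem 2).2 hv)]
      simp [pvIdx]
    · simp [h1, h2]
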